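-- pv_equiv track=rewrite | github.com/slvr611/PoA-Website-Flask | app.py | compute_resource_storage_capacity
-- ===== SOURCE A (Python) =====
-- general_resources = [
--     {"key": "food", "name": "Food", "base_storage": 20},
--     {"key": "wood", "name": "Wood", "base_storage": 15},
--     {"key": "stone", "name": "Stone", "base_storage": 15},
--     {"key": "mounts", "name": "Mounts", "base_storage": 10},
--     {"key": "research", "name": "Research", "base_storage": 0},
--     {"key": "magic", "name": "Magic", "base_storage": 10}
-- ]
--
-- unique_resources = [
--     {"key": "bronze", "name": "Bronze", "base_storage": 5},
--     {"key": "iron", "name": "Iron", "base_storage": 0},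
-- ]
--
-- def compute_resource_storage_capacity(field, target, base_value, field_schema, modifier_totals, district_totals, law_totals, job_totals):
--     storage_dict = {}
--
--     all_resources = general_resources + unique_resources
--
--     for resource in all_resources:
--         specific_resource_storage = resource["base_storage"]
--         modifiers_to_check = [resource["key"] + "_storage", "resource_storage"]
--         for modifier in modifiers_to_check:
--             specific_resource_storage += modifier_totals.get(modifier, 0) + district_totals.get(modifier, 0) + law_totals.get(modifier, 0) + job_totals.get(modifier, 0)
--         storage_dict[resource["key"]] = specific_resource_storage
--
--     return storage_dict
-- ===== SOURCE B (Python) =====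
-- general_resources = [
--     {"key": "food", "name": "Food", "base_storage": 20},
--     {"key": "wood", "name": "Wood", "base_storage": 15},
--     {"key": "stone", "name": "Stone", "base_storage": 15},
--     {"key": "mounts", "name": "Mounts", "base_storage": 10},
--     {"key": "research", "name": "Research", "base_storage": 0},
--     {"key": "magic", "name": "Magic", "base_storage": 10}
-- ]
--
-- unique_resources = [
--     {"key": "bronze", "name": "Bronze", "base_storage": 5},
--     {"key": "iron", "name": "Iron", "base_storage": 0},
-- ]
--
-- def compute_resource_storage_capacity(field, target, base_value, field_schema, modifier_totals, district_totals, law_totals, job_totals):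
--     # Inverted traversal: instead of looking up every resource's modifier in every
--     # totals dict, scan the four totals dicts once, bucketing each "<key>_storage"
--     # bonus under its resource key and accumulating the universal "resource_storage"
--     # bonus, then read each resource's bucket in a final pass over the resource table.
--     universal = 0
--     bonus = {}
--     for totals in (modifier_totals, district_totals, law_totals, job_totals):
--         for key, value in totals.items():
--             if key == "resource_storage":
--                 universal += value
--             elif key.endswith("_storage"):
--                 bonus[key[:-8]] = bonus.get(key[:-8], 0) + value
--     result = {}
--     for resource in general_resources + unique_resources:
--         result[resource["key"]] = resource["base_storage"] + bonus.get(resource["key"], 0) + universal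
--     return result
-- ===== Notes on version B (the rewrite author's own statement) =====
-- stated objective: alternative
-- what changed: B inverts the traversal: instead of looking up eight keys in each of the four totals dicts, it scans the four totals dicts once, bucketing every '<key>_storage' entry under its resource key and accumulating the universal 'resource_storage' bonus, then reads each resource's bucket in one final pass over the resource table.
import Mathlib
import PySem

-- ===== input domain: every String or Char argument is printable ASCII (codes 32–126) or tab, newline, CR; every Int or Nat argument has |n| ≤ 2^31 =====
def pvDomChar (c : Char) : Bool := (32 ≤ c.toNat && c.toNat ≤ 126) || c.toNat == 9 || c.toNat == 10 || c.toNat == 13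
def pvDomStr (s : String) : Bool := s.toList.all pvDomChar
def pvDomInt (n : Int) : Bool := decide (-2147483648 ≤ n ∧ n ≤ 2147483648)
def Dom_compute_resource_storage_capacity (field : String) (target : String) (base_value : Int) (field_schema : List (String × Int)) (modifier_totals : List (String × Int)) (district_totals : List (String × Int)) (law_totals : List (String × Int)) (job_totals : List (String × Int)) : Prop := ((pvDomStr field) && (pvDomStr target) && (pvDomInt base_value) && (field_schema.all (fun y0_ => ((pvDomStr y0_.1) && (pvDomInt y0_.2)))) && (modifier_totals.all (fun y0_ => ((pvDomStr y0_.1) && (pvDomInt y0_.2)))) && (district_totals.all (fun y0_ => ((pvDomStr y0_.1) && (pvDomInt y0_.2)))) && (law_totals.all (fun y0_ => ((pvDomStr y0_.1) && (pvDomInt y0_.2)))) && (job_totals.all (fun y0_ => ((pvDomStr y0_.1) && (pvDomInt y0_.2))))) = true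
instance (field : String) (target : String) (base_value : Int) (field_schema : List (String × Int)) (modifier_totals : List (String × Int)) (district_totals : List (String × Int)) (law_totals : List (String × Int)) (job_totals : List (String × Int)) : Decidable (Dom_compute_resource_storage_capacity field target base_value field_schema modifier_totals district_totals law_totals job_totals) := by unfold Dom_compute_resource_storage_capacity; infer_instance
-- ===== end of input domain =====

-- B inverts the traversal (scan the four totals dicts once into buckets instead of
-- per-resource lookups); objective: alternative, same practical cost at this size.

-- ===== PORT A =====
def pvGeneralResources : List (String × Int) :=
  [("food", 20), ("wood", 15), ("stone", 15), ("mounts", 10), ("research", 0), ("magic", 10)]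

def pvUniqueResources : List (String × Int) :=
  [("bronze", 5), ("iron", 0)]

def compute_resource_storage_capacity (field : String) (target : String) (base_value : Int) (field_schema : List (String × Int)) (modifier_totals : List (String × Int)) (district_totals : List (String × Int)) (law_totals : List (String × Int)) (job_totals : List (String × Int)) : List (String × Int) :=
  let storage_dict : PySem.Dict String Int := PySem.Dict.empty
  let all_resources := pvGeneralResources ++ pvUniqueResources
  (all_resources.foldl (fun d r =>
      let s0 : Int := r.2
      let modifiers_to_check : List String := [r.1 ++ "_storage", "resource_storage"]
      let s := modifiers_to_check.foldl (fun s m =>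
        s + (PySem.Dict.mk modifier_totals).getD m 0 + (PySem.Dict.mk district_totals).getD m 0
          + (PySem.Dict.mk law_totals).getD m 0 + (PySem.Dict.mk job_totals).getD m 0) s0
      d.insert r.1 s) storage_dict).items

-- ===== PORT B =====
-- one step of B's scan over a totals dict's items: route the entry to the universal
-- accumulator or to its resource's bucket (key[:-8]); ports the inner loop body of Source B
def pvStepB (st : Int × PySem.Dict String Int) (kv : String × Int) : Int × PySem.Dict String Int :=
  if kv.1 == "resource_storage" then (st.1 + kv.2, st.2)
  else if PySem.Str.endswith kv.1 "_storage" then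
    let b := PySem.Str.slice kv.1 none (some (-8))
    (st.1, st.2.insert b (st.2.getD b 0 + kv.2))
  else st

def compute_resource_storage_capacity_alt (field : String) (target : String) (base_value : Int) (field_schema : List (String × Int)) (modifier_totals : List (String × Int)) (district_totals : List (String × Int)) (law_totals : List (String × Int)) (job_totals : List (String × Int)) : List (String × Int) :=
  let st := [modifier_totals, district_totals, law_totals, job_totals].foldl
    (fun st totals => totals.foldl pvStepB st) ((0 : Int), (PySem.Dict.empty : PySem.Dict String Int))
  let universal := st.1
  let bonus := st.2
  ((pvGeneralResources ++ pvUniqueResources).foldl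
    (fun d r => d.insert r.1 (r.2 + bonus.getD r.1 0 + universal))
    (PySem.Dict.empty : PySem.Dict String Int)).items

-- ===== PRECONDITION & SPEC =====
-- Pre_ excludes association lists with duplicate keys in the four totals arguments;
-- such lists do not represent Python dicts (dict keys are unique), so no input the
-- Python function can actually receive is excluded.
def Pre_compute_resource_storage_capacity (field : String) (target : String) (base_value : Int) (field_schema : List (String × Int)) (modifier_totals : List (String × Int)) (district_totals : List (String × Int)) (law_totals : List (String × Int)) (job_totals : List (String × Int)) : Prop :=
  (modifier_totals.map Prod.fst).Nodup ∧ (district_totals.map Prod.fst).Nodup ∧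
  (law_totals.map Prod.fst).Nodup ∧ (job_totals.map Prod.fst).Nodup
instance (field : String) (target : String) (base_value : Int) (field_schema : List (String × Int)) (modifier_totals : List (String × Int)) (district_totals : List (String × Int)) (law_totals : List (String × Int)) (job_totals : List (String × Int)) : Decidable (Pre_compute_resource_storage_capacity field target base_value field_schema modifier_totals district_totals law_totals job_totals) := by unfold Pre_compute_resource_storage_capacity; infer_instance

def pvWitness_compute_resource_storage_capacity : String × String × Int × (List (String × Int)) × (List (String × Int)) × (List (String × Int)) × (List (String × Int)) × (List (String × Int)) :=
  ("f", "t", 0, [], [("food_storage", 3), ("resource_storage", 1)], [("wood_storage", 2)], [], [("x", 9)])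

def Spec_compute_resource_storage_capacity (field : String) (target : String) (base_value : Int) (field_schema : List (String × Int)) (modifier_totals : List (String × Int)) (district_totals : List (String × Int)) (law_totals : List (String × Int)) (job_totals : List (String × Int)) (out : List (String × Int)) : Prop := out = compute_resource_storage_capacity_alt field target base_value field_schema modifier_totals district_totals law_totals job_totals
instance (field : String) (target : String) (base_value : Int) (field_schema : List (String × Int)) (modifier_totals : List (String × Int)) (district_totals : List (String × Int)) (law_totals : List (String × Int)) (job_totals : List (String × Int)) (out : List (String × Int)) : Decidable (Spec_compute_resource_storage_capacity field target base_value field_schema modifier_totals district_totals law_totals job_totals out) := by unfold Spec_compute_resource_storage_capacity; infer_instance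

-- ===== CLAIM =====
def Claim_equal_compute_resource_storage_capacity : Prop := ∀ (field : String) (target : String) (base_value : Int) (field_schema : List (String × Int)) (modifier_totals : List (String × Int)) (district_totals : List (String × Int)) (law_totals : List (String × Int)) (job_totals : List (String × Int)), Dom_compute_resource_storage_capacity field target base_value field_schema modifier_totals district_totals law_totals job_totals → Pre_compute_resource_storage_capacity field target base_value field_schema modifier_totals district_totals law_totals job_totals → Spec_compute_resource_storage_capacity field target base_value field_schema modifier_totals district_totals law_totals job_totals (compute_resource_storage_capacity field target base_value field_schema modifier_totals district_totals law_totals job_totals)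

-- ===== LEMMAS AND PROOFS =====

-- sum of the values of all entries of L whose key equals `key`
def pvWSum (L : List (String × Int)) (key : String) : Int :=
  (L.map (fun p => if p.1 = key then p.2 else 0)).sum

theorem pv_endswith_decomp (a : String) (h : PySem.Str.endswith a "_storage" = true) :
    (PySem.Str.slice a none (some (-8))) ++ "_storage" = a := by
  have h' : ("_storage" : String).toList <:+ a.toList := by
    rw [PySem.Str.endswith_eq] at h
    exact (PySem.Chars.endswith_iff _ _).mp h
  obtain ⟨t, ht⟩ := h'
  have hslice : (PySem.Str.slice a none (some (-8))).toList = t := by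
    rw [PySem.Str.toList_slice, PySem.Chars.slice_eq_listSlice,
      PySem.List.slice_to_neg_ofNat a.toList 8 (by omega)]
    rw [← ht]
    have : (t ++ ("_storage" : String).toList).length - 8 = t.length := by simp
    rw [this, List.take_left]
  apply String.toList_injective
  simp [hslice, ← ht]

theorem pv_append_cancel {s t u : String} (h : s ++ u = t ++ u) : s = t := by
  have := congrArg String.toList h
  simp at this
  exact String.toList_injective this

theorem pv_endswith_append (k : String) : PySem.Str.endswith (k ++ "_storage") "_storage" = true := by
  rw [PySem.Str.endswith_eq]
  apply (PySem.Chars.endswith_iff _ _).mpr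
  exact ⟨k.toList, by simp⟩

theorem pvStepB_case1 (st : Int × PySem.Dict String Int) (p : String × Int)
    (h1 : p.1 = "resource_storage") : pvStepB st p = (st.1 + p.2, st.2) := by
  simp [pvStepB, h1]

theorem pvStepB_case2 (st : Int × PySem.Dict String Int) (p : String × Int)
    (h1 : ¬ p.1 = "resource_storage") (h2 : PySem.Str.endswith p.1 "_storage" = true) :
    pvStepB st p = (st.1, st.2.insert (PySem.Str.slice p.1 none (some (-8)))
      (st.2.getD (PySem.Str.slice p.1 none (some (-8))) 0 + p.2)) := by
  have h2c := h2
  simp [PySem.Str.endswith_eq] at h2c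
  simp [pvStepB, h1, h2c]

theorem pvStepB_case3 (st : Int × PySem.Dict String Int) (p : String × Int)
    (h1 : ¬ p.1 = "resource_storage") (h2 : ¬ PySem.Str.endswith p.1 "_storage" = true) :
    pvStepB st p = st := by
  have h2c : ¬ PySem.Chars.endswith p.1.toList "_storage".toList = true := by
    rw [← PySem.Str.endswith_eq]; exact h2
  simp at h2c
  simp [pvStepB, h1, h2c]

theorem pvStepB_fst (st : Int × PySem.Dict String Int) (p : String × Int) :
    (pvStepB st p).1 = st.1 + (if p.1 = "resource_storage" then p.2 else 0) := by
  by_cases h1 : p.1 = "resource_storage"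
  · simp [pvStepB_case1 st p h1, h1]
  · by_cases h2 : PySem.Str.endswith p.1 "_storage" = true
    · simp [pvStepB_case2 st p h1 h2, h1]
    · simp [pvStepB_case3 st p h1 h2, h1]

theorem pvStepB_getD (st : Int × PySem.Dict String Int) (p : String × Int)
    (k : String) (hk : k ≠ "resource") :
    ((pvStepB st p).2).getD k 0 = st.2.getD k 0 + (if p.1 = k ++ "_storage" then p.2 else 0) := by
  by_cases h1 : p.1 = "resource_storage"
  · have hne : p.1 ≠ k ++ "_storage" := by
      intro hc
      apply hk
      have : k ++ "_storage" = "resource" ++ "_storage" := by rw [← hc, h1]; rfl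
      exact pv_append_cancel this
    rw [pvStepB_case1 st p h1]
    simp [hne]
  · by_cases h2 : PySem.Str.endswith p.1 "_storage" = true
    · have hb := pv_endswith_decomp p.1 h2
      rw [pvStepB_case2 st p h1 h2]
      by_cases h3 : k = PySem.Str.slice p.1 none (some (-8))
      · have hpk : p.1 = k ++ "_storage" := by rw [h3]; exact hb.symm
        rw [PySem.Dict.getD_insert, if_pos h3, ← h3, if_pos hpk]
      · have hpk : p.1 ≠ k ++ "_storage" := by
          intro hc
          exact h3 (pv_append_cancel (hb.trans hc)).symm
        simp [PySem.Dict.getD_insert, h3, hpk]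
    · have hpk : p.1 ≠ k ++ "_storage" := by
        intro hc; rw [hc] at h2; exact h2 (pv_endswith_append k)
      rw [pvStepB_case3 st p h1 h2]
      simp [hpk]

theorem pv_foldB_fst (L : List (String × Int)) (st : Int × PySem.Dict String Int) :
    (L.foldl pvStepB st).1 = st.1 + pvWSum L "resource_storage" := by
  induction L generalizing st with
  | nil => simp [pvWSum]
  | cons p L ih =>
    rw [List.foldl_cons, ih, pvStepB_fst]
    simp [pvWSum]
    ring

theorem pv_foldB_getD (L : List (String × Int)) (st : Int × PySem.Dict String Int)
    (k : String) (hk : k ≠ "resource") :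
    (L.foldl pvStepB st).2.getD k 0 = st.2.getD k 0 + pvWSum L (k ++ "_storage") := by
  induction L generalizing st with
  | nil => simp [pvWSum]
  | cons p L ih =>
    rw [List.foldl_cons, ih, pvStepB_getD st p k hk]
    simp [pvWSum]
    ring

theorem pvWSum_of_not_mem (l : List (String × Int)) (key : String)
    (h : key ∉ l.map Prod.fst) : pvWSum l key = 0 := by
  induction l with
  | nil => rfl
  | cons p l ih =>
    simp at h
    simp [pvWSum] at ih ⊢
    rcases h with ⟨h1, h2⟩
    simp [ih h2]
    intro hc; exact absurd hc.symm h1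

theorem pv_wsum_eq_getD (l : List (String × Int)) (hn : (l.map Prod.fst).Nodup) (key : String) :
    pvWSum l key = (PySem.Dict.mk l).getD key 0 := by
  induction l with
  | nil => simp [pvWSum, PySem.Dict.getD_eq_get?_getD]; rfl
  | cons p l ih =>
    rw [List.map_cons, List.nodup_cons] at hn
    rw [PySem.Dict.getD_eq_get?_getD, PySem.Dict.get?_mk_cons]
    by_cases h : p.1 = key
    · have h0 : pvWSum l key = 0 := pvWSum_of_not_mem l key (h ▸ hn.1)
      simp [pvWSum] at h0
      simp [pvWSum, h, h0]
    · simp [pvWSum, h]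
      rw [← PySem.Dict.getD_eq_get?_getD]
      simpa [pvWSum] using ih hn.2


-- ===== VERDICT =====
theorem compute_resource_storage_capacity_spec : Claim_equal_compute_resource_storage_capacity := by
  intro field target base_value field_schema l1 l2 l3 l4 _ hpre
  obtain ⟨hn1, hn2, hn3, hn4⟩ := hpre
  unfold Spec_compute_resource_storage_capacity
  unfold compute_resource_storage_capacity compute_resource_storage_capacity_alt
  simp only [pvGeneralResources, pvUniqueResources, List.cons_append, List.nil_append,
    List.foldl_cons, List.foldl_nil]
  have hfst : (List.foldl pvStepB (List.foldl pvStepB (List.foldl pvStepB (List.foldl pvStepB ((0:Int), (PySem.Dict.empty : PySem.Dict String Int)) l1) l2) l3) l4).1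
      = (PySem.Dict.mk l1).getD "resource_storage" 0 + (PySem.Dict.mk l2).getD "resource_storage" 0
        + (PySem.Dict.mk l3).getD "resource_storage" 0 + (PySem.Dict.mk l4).getD "resource_storage" 0 := by
    rw [pv_foldB_fst, pv_foldB_fst, pv_foldB_fst, pv_foldB_fst,
        pv_wsum_eq_getD l1 hn1, pv_wsum_eq_getD l2 hn2, pv_wsum_eq_getD l3 hn3, pv_wsum_eq_getD l4 hn4]
    ring
  have hgd : ∀ k : String, k ≠ "resource" →
      (List.foldl pvStepB (List.foldl pvStepB (List.foldl pvStepB (List.foldl pvStepB ((0:Int), (PySem.Dict.empty : PySem.Dict String Int)) l1) l2) l3) l4).2.getD k 0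
      = (PySem.Dict.mk l1).getD (k ++ "_storage") 0 + (PySem.Dict.mk l2).getD (k ++ "_storage") 0
        + (PySem.Dict.mk l3).getD (k ++ "_storage") 0 + (PySem.Dict.mk l4).getD (k ++ "_storage") 0 := by
    intro k hk
    rw [pv_foldB_getD _ _ k hk, pv_foldB_getD _ _ k hk, pv_foldB_getD _ _ k hk, pv_foldB_getD _ _ k hk,
        pv_wsum_eq_getD l1 hn1, pv_wsum_eq_getD l2 hn2, pv_wsum_eq_getD l3 hn3, pv_wsum_eq_getD l4 hn4,
        PySem.Dict.getD_empty]
    ring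
  rw [hfst,
      hgd "food" (by decide), hgd "wood" (by decide), hgd "stone" (by decide),
      hgd "mounts" (by decide), hgd "research" (by decide), hgd "magic" (by decide),
      hgd "bronze" (by decide), hgd "iron" (by decide)]
  simp [PySem.Dict.insert, PySem.Dict.empty, PySem.Dict.contains]
  ring_nf
  trivial
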